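-- pv_equiv track=rewrite | github.com/kwontaekyoon/LeetCode | Medium/2337. Move Pieces to Obtain a String.py | canChange
-- ===== SOURCE A (Python) =====
-- def canChange(start: str, target: str) -> bool:
--     n = len(start)
--     if start.replace("_", "") != target.replace("_", ""):
--         return False
--
--     startL = [i for i in range(n) if start[i] == "L"]
--     endL = [i for i in range(n) if target[i] == "L"]
--     startR = [i for i in range(n) if start[i] == "R"]
--     endR = [i for i in range(n) if target[i] == "R"]
--
--     for s,e in zip(startL, endL):
--         if s < e:
--             return False
--
--     for s,e in zip(startR, endR):
--         if s > e:
--             return False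
--
--     return True
-- ===== SOURCE B (Python) =====
-- def canChange(start: str, target: str) -> bool:
--     n, m = len(start), len(target)
--     i = j = 0
--     while True:
--         while i < n and start[i] == '_':
--             i += 1
--         while j < m and target[j] == '_':
--             j += 1
--         if i == n or j == m:
--             return i == n and j == m
--         c = start[i]
--         if c != target[j]:
--             return False
--         if c == 'L' and i < j:
--             return False
--         if c == 'R' and j < i:
--             return False
--         i += 1
--         j += 1
-- ===== Notes on version B (the rewrite author's own statement) =====
-- stated objective: alternative
-- what changed: A's replace-equality test plus four index-list comprehensions and two zip scans are replaced by a single left-to-right two-pointer scan that skips underscores in both strings and checks character equality and the L/R position constraints on the fly.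
-- outside the precondition, e.g. on canChange('L', '_L'): A returns True, B returns False
import Mathlib
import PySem

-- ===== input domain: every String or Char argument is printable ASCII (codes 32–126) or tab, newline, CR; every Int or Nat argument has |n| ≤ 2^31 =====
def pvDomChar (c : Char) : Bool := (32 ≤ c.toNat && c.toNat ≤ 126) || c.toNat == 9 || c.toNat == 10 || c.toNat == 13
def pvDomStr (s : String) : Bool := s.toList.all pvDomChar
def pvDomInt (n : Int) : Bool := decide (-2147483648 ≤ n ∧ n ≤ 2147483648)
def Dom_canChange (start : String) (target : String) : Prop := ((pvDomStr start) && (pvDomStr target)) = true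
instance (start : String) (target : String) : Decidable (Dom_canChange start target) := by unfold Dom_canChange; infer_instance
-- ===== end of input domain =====

-- B replaces A's replace-equality check, four index comprehensions and two zip scans
-- by a single left-to-right two-pointer scan over both strings (alternative
-- decomposition, one pass). Equivalence of the return value on equal-length inputs.

-- ===== PORT A =====
def canChange (start : String) (target : String) : Bool :=
  let n : Int := PySem.Str.len start
  if PySem.Str.replace start "_" "" ≠ PySem.Str.replace target "_" "" then false
  else
    let startL := (PySem.List.pyRange 0 n 1).filter (fun i => PySem.Str.pyGet? start i == some 'L')
    let endL := (PySem.List.pyRange 0 n 1).filter (fun i => PySem.Str.pyGet? target i == some 'L')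
    let startR := (PySem.List.pyRange 0 n 1).filter (fun i => PySem.Str.pyGet? start i == some 'R')
    let endR := (PySem.List.pyRange 0 n 1).filter (fun i => PySem.Str.pyGet? target i == some 'R')
    if (startL.zip endL).any (fun p => p.1 < p.2) then false
    else if (startR.zip endR).any (fun p => p.1 > p.2) then false
    else true

-- ===== PORT B =====
-- the two-pointer while-loop of Source B as fuel-guarded structural recursion on the two
-- remaining suffixes; i and j are the pointer positions into the original strings
def canChangeGo : Nat → List Char → List Char → Nat → Nat → Bool
  | 0, _, _, _, _ => false   -- fuel guard only, never reached from canChange_alt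
  | _ + 1, [], ys, _, _ => ys.all (fun c => c == '_')
  | _ + 1, xs, [], _, _ => xs.all (fun c => c == '_')
  | fuel + 1, x :: xs, y :: ys, i, j =>
    if x == '_' then canChangeGo fuel xs (y :: ys) (i + 1) j
    else if y == '_' then canChangeGo fuel (x :: xs) ys i (j + 1)
    else if x != y then false
    else if x == 'L' && decide (i < j) then false
    else if x == 'R' && decide (j < i) then false
    else canChangeGo fuel xs ys (i + 1) (j + 1)

def canChange_alt (start : String) (target : String) : Bool :=
  canChangeGo (start.toList.length + target.toList.length + 1) start.toList target.toList 0 0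

-- ===== PRECONDITION & SPEC =====
-- Pre_ excludes only the inputs whose non-underscore piece sequences are equal but whose
-- lengths differ: there A raises IndexError (target shorter) or returns an accidental
-- value from target scans silently truncated to len(start) (target longer); the
-- function's stated domain is equal-length strings.
def Pre_canChange (start : String) (target : String) : Prop :=
  start.toList.filter (fun c => !(c == '_')) ≠ target.toList.filter (fun c => !(c == '_'))
    ∨ start.toList.length = target.toList.length
instance (start : String) (target : String) : Decidable (Pre_canChange start target) := by
  unfold Pre_canChange; infer_instance

def pvWitness_canChange : String × String := ("_L__R__R_", "L______RR")

def Spec_canChange (start : String) (target : String) (out : Bool) : Prop :=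
  out = canChange_alt start target
instance (start : String) (target : String) (out : Bool) : Decidable (Spec_canChange start target out) := by
  unfold Spec_canChange; infer_instance

-- ===== CLAIM (what is proved, stated in full; the proofs are below) =====
def Claim_equal_canChange : Prop := ∀ (start : String) (target : String),
  Dom_canChange start target → Pre_canChange start target →
    Spec_canChange start target (canChange start target)

-- ===== LEMMAS AND PROOFS =====

-- the (index, char) pairs of the non-underscore characters, indices starting at k
def pvPieces : List Char → Nat → List (Nat × Char)
  | [], _ => []
  | c :: cs, k => if c == '_' then pvPieces cs (k + 1) else (k, c) :: pvPieces cs (k + 1)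

-- pointwise condition on the paired pieces: the semantic core of both programs
def pvCheck : List (Nat × Char) → List (Nat × Char) → Bool
  | [], [] => true
  | [], _ :: _ => false
  | _ :: _, [] => false
  | (a, c) :: ps, (b, d) :: qs =>
    (c == d) && !(c == 'L' && decide (a < b)) && !(c == 'R' && decide (b < a)) && pvCheck ps qs

theorem pvPieces_map_snd (cs : List Char) : ∀ k,
    (pvPieces cs k).map Prod.snd = cs.filter (fun c => !(c == '_')) := by
  induction cs with
  | nil => intro k; simp [pvPieces]
  | cons c cs ih =>
    intro k
    by_cases h : c = '_' <;> simp [pvPieces, h, ih]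

theorem pvPieces_empty_iff (cs : List Char) : ∀ k,
    (cs.all (fun c => c == '_')) = (pvPieces cs k).isEmpty := by
  induction cs with
  | nil => intro k; simp [pvPieces]
  | cons c cs ih =>
    intro k
    by_cases h : c = '_' <;> simp [pvPieces, h, ih (k + 1)]

theorem pvCheck_nil_left (qs : List (Nat × Char)) : pvCheck [] qs = qs.isEmpty := by
  cases qs <;> rfl

theorem pvCheck_nil_right (ps : List (Nat × Char)) : pvCheck ps [] = ps.isEmpty := by
  cases ps with
  | nil => rfl
  | cons p ps => cases p; rfl

-- B's scan computes pvCheck of the two piece lists (given enough fuel)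
theorem canChangeGo_eq_pvCheck : ∀ (fuel : Nat) (xs ys : List Char) (i j : Nat),
    xs.length + ys.length < fuel →
    canChangeGo fuel xs ys i j = pvCheck (pvPieces xs i) (pvPieces ys j) := by
  intro fuel
  induction fuel with
  | zero => intro xs ys i j h; omega
  | succ fuel ih =>
    intro xs ys i j h
    match xs, ys with
    | [], ys =>
      simp [canChangeGo, pvPieces, pvCheck_nil_left, pvPieces_empty_iff ys j]
    | x :: xs, [] =>
      rw [show canChangeGo (fuel + 1) (x :: xs) [] i j
          = (x :: xs).all (fun c => c == '_') from rfl]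
      rw [show pvPieces ([] : List Char) j = [] from rfl]
      rw [pvCheck_nil_right, pvPieces_empty_iff (x :: xs) i]
    | x :: xs, y :: ys =>
      by_cases hx : x = '_'
      · rw [show canChangeGo (fuel + 1) (x :: xs) (y :: ys) i j
            = canChangeGo fuel xs (y :: ys) (i + 1) j by rw [canChangeGo]; simp [hx]]
        rw [ih xs (y :: ys) (i + 1) j (by simp at h ⊢; omega)]
        simp [pvPieces, hx]
      · by_cases hy : y = '_'
        · rw [show canChangeGo (fuel + 1) (x :: xs) (y :: ys) i j
              = canChangeGo fuel (x :: xs) ys i (j + 1) by rw [canChangeGo]; simp [hx, hy]]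
          rw [ih (x :: xs) ys i (j + 1) (by simp at h ⊢; omega)]
          rw [show pvPieces (y :: ys) j = pvPieces ys (j + 1) by simp [pvPieces, hy]]
        · rw [show canChangeGo (fuel + 1) (x :: xs) (y :: ys) i j
              = (if x != y then false
                 else if x == 'L' && decide (i < j) then false
                 else if x == 'R' && decide (j < i) then false
                 else canChangeGo fuel xs ys (i + 1) (j + 1)) by rw [canChangeGo]; simp [hx, hy]]
          rw [show pvPieces (x :: xs) i = (i, x) :: pvPieces xs (i + 1) by simp [pvPieces, hx]]
          rw [show pvPieces (y :: ys) j = (j, y) :: pvPieces ys (j + 1) by simp [pvPieces, hy]]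
          rw [show pvCheck ((i, x) :: pvPieces xs (i + 1)) ((j, y) :: pvPieces ys (j + 1))
              = ((x == y) && !(x == 'L' && decide (i < j)) && !(x == 'R' && decide (j < i))
                  && pvCheck (pvPieces xs (i + 1)) (pvPieces ys (j + 1))) from rfl]
          rw [← ih xs ys (i + 1) (j + 1) (by simp at h ⊢; omega)]
          by_cases hxy : x = y
          · subst hxy
            by_cases hL : x = 'L' <;> by_cases hR : x = 'R' <;>
              simp [hL, hR, bne]
          · simp [hxy, bne]

theorem pvCheck_sound (ps : List (Nat × Char)) : ∀ qs,
    pvCheck ps qs = true → ps.map Prod.snd = qs.map Prod.snd := by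
  induction ps with
  | nil =>
    intro qs h
    cases qs with
    | nil => rfl
    | cons q qs => simp [pvCheck] at h
  | cons p ps ih =>
    intro qs h
    cases qs with
    | nil => obtain ⟨a, c⟩ := p; simp [pvCheck] at h
    | cons q qs =>
      obtain ⟨a, c⟩ := p; obtain ⟨b, d⟩ := q
      rw [show pvCheck ((a, c) :: ps) ((b, d) :: qs)
          = ((c == d) && !(c == 'L' && decide (a < b)) && !(c == 'R' && decide (b < a))
              && pvCheck ps qs) from rfl] at h
      simp only [Bool.and_eq_true, beq_iff_eq] at h
      simp [h.1.1.1, ih qs h.2]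

-- the four-list check of A, restated on the paired pieces, equals pvCheck
theorem pvCheck_of_snd_eq (ps : List (Nat × Char)) : ∀ qs,
    ps.map Prod.snd = qs.map Prod.snd →
    pvCheck ps qs =
      (!((ps.filter (fun p => p.2 == 'L')).zip (qs.filter (fun p => p.2 == 'L'))).any
          (fun p => decide (p.1.1 < p.2.1))
        && !((ps.filter (fun p => p.2 == 'R')).zip (qs.filter (fun p => p.2 == 'R'))).any
          (fun p => decide (p.2.1 < p.1.1))) := by
  induction ps with
  | nil =>
    intro qs h
    cases qs with
    | nil => rfl
    | cons q qs => simp at h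
  | cons p ps ih =>
    intro qs h
    cases qs with
    | nil => simp at h
    | cons q qs =>
      obtain ⟨a, c⟩ := p; obtain ⟨b, d⟩ := q
      simp only [List.map_cons, List.cons.injEq] at h
      obtain ⟨hcd, htl⟩ := h
      subst hcd
      rw [show pvCheck ((a, c) :: ps) ((b, c) :: qs)
          = ((c == c) && !(c == 'L' && decide (a < b)) && !(c == 'R' && decide (b < a))
              && pvCheck ps qs) from rfl]
      rw [ih qs htl]
      by_cases hL : c = 'L' <;> by_cases hR : c = 'R' <;>
        simp [hL, hR] <;>
        by_cases hab : a < b <;> by_cases hba : b < a <;>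
        simp [hab, hba]

-- PySem.Chars.replace with pattern "_" and empty replacement is a filter
theorem pvReplaceGo (old : List Char) (hold : old = ['_']) : ∀ (fuel : Nat) (l acc : List Char),
    l.length ≤ fuel →
    PySem.Chars.replace.go old [] fuel l acc
      = acc.reverse ++ l.filter (fun c => !(c == '_')) := by
  subst hold
  intro fuel
  induction fuel with
  | zero =>
    intro l acc h
    have : l = [] := by cases l <;> simp_all
    subst this
    simp [PySem.Chars.replace.go]
  | succ fuel ih =>
    intro l acc h
    cases l with
    | nil => simp [PySem.Chars.replace.go]
    | cons c t =>
      rw [show PySem.Chars.replace.go ['_'] [] (fuel + 1) (c :: t) acc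
          = (if ['_'].isPrefixOf (c :: t) then
               PySem.Chars.replace.go ['_'] [] fuel (List.drop ['_'].length (c :: t))
                 (([] : List Char).reverse ++ acc)
             else PySem.Chars.replace.go ['_'] [] fuel t (c :: acc)) from rfl]
      by_cases hc : c = '_'
      · subst hc
        rw [if_pos (by simp [List.isPrefixOf])]
        rw [show List.drop ['_'].length ('_' :: t) = t from rfl]
        rw [ih t (([] : List Char).reverse ++ acc) (by simp at h; omega)]
        simp
      · rw [if_neg (by simp [List.isPrefixOf]; exact fun hh => hc hh.symm)]
        rw [ih t (c :: acc) (by simp at h; omega)]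
        simp [hc]

theorem pvReplace_eq_filter (cs : List Char) :
    PySem.Chars.replace cs ['_'] [] = cs.filter (fun c => !(c == '_')) := by
  rw [show PySem.Chars.replace cs ['_'] []
      = PySem.Chars.replace.go ['_'] [] cs.length cs [] from rfl]
  rw [pvReplaceGo ['_'] rfl cs.length cs [] (le_refl _)]
  rfl

theorem pvStrReplace_iff (s t : String) :
    (PySem.Str.replace s "_" "" = PySem.Str.replace t "_" "")
      ↔ s.toList.filter (fun c => !(c == '_')) = t.toList.filter (fun c => !(c == '_')) := by
  constructor
  · intro h
    have h2 := congrArg String.toList h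
    rw [PySem.Str.toList_replace, PySem.Str.toList_replace] at h2
    simpa [pvReplace_eq_filter] using h2
  · intro h
    have h2 : (PySem.Str.replace s "_" "").toList = (PySem.Str.replace t "_" "").toList := by
      rw [PySem.Str.toList_replace, PySem.Str.toList_replace]
      simpa [pvReplace_eq_filter] using h
    exact String.toList_injective h2

-- A's index comprehension over range(n) as a map of the filtered pieces (c ≠ '_')
theorem pvRangeFilterNat (c : Char) (hc : c ≠ '_') (cs : List Char) : ∀ (k : Nat),
    ((List.range cs.length).filter (fun i => cs[i]? == some c)).map (fun i => i + k)
      = ((pvPieces cs k).filter (fun p => p.2 == c)).map Prod.fst := by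
  induction cs with
  | nil => intro k; simp [pvPieces]
  | cons x cs ih =>
    intro k
    rw [List.length_cons, List.range_succ_eq_map]
    rw [List.filter_cons]
    have htail : ((List.range cs.length).map Nat.succ).filter
        (fun i => (x :: cs)[i]? == some c)
        = ((List.range cs.length).filter (fun i => cs[i]? == some c)).map Nat.succ := by
      rw [List.filter_map]
      congr 1
    by_cases hx : x = c
    · subst hx
      rw [if_pos (by simp)]
      rw [show pvPieces (x :: cs) k = (k, x) :: pvPieces cs (k + 1) by
        simp [pvPieces, hc]]
      rw [List.filter_cons]
      rw [if_pos (by simp)]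
      simp only [List.map_cons, htail, List.map_map]
      rw [show ((List.range cs.length).filter (fun i => cs[i]? == some x)).map
            ((fun i => i + k) ∘ Nat.succ)
          = ((List.range cs.length).filter (fun i => cs[i]? == some x)).map
            (fun i => i + (k + 1)) by
        apply List.map_congr_left; intro a _; simp [Function.comp]; omega]
      rw [ih (k + 1)]
      simp
    · rw [if_neg (by simp [hx])]
      rw [htail, List.map_map]
      rw [show ((List.range cs.length).filter (fun i => cs[i]? == some c)).map
            ((fun i => i + k) ∘ Nat.succ)
          = ((List.range cs.length).filter (fun i => cs[i]? == some c)).map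
            (fun i => i + (k + 1)) by
        apply List.map_congr_left; intro a _; simp [Function.comp]; omega]
      rw [ih (k + 1)]
      by_cases hu : x = '_'
      · rw [show pvPieces (x :: cs) k = pvPieces cs (k + 1) by simp [pvPieces, hu]]
      · rw [show pvPieces (x :: cs) k = (k, x) :: pvPieces cs (k + 1) by simp [pvPieces, hu]]
        rw [List.filter_cons, if_neg (by simp [hx])]

theorem pvRangeFilter (c : Char) (hc : c ≠ '_') (cs : List Char) :
    (PySem.List.pyRange 0 (cs.length : Int) 1).filter
        (fun i => PySem.List.pyGet? cs i == some c)
      = ((pvPieces cs 0).filter (fun p => p.2 == c)).map (fun p => (p.1 : Int)) := by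
  rw [PySem.List.pyRange_one]
  rw [List.filter_map]
  have hpred : ((fun i => PySem.List.pyGet? cs i == some c) ∘ fun k : Nat => (0 : Int) + k)
      = fun k : Nat => cs[k]? == some c := by
    funext k; simp [Function.comp]
  simp only [sub_zero, Int.toNat_natCast]
  rw [hpred]
  have h0 := congrArg (List.map (fun n : Nat => (n : Int))) (pvRangeFilterNat c hc cs 0)
  rw [List.map_map, List.map_map] at h0
  rw [show (((List.range cs.length).filter (fun k => cs[k]? == some c)).map
        (fun k : Nat => (0 : Int) + ↑k))
      = (((List.range cs.length).filter (fun k => cs[k]? == some c)).map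
        ((fun n : Nat => (n : Int)) ∘ (fun i => i + 0))) by
    apply List.map_congr_left; intro a _; simp]
  rw [h0]
  apply List.map_congr_left; intro a _; simp [Function.comp]

-- ===== VERDICT (by name: the statement is the Claim_ definition above) =====
theorem canChange_spec : Claim_equal_canChange := by
  intro s t _ hpre
  unfold Spec_canChange canChange canChange_alt
  rw [canChangeGo_eq_pvCheck _ _ _ _ _ (by omega)]
  by_cases hrep : PySem.Str.replace s "_" "" = PySem.Str.replace t "_" ""
  · rw [if_neg (by simp [hrep])]
    have hfil := (pvStrReplace_iff s t).mp hrep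
    have hlen0 : s.toList.length = t.toList.length := by
      rcases hpre with h | h
      · exact absurd hfil h
      · exact h
    have hsnd : (pvPieces s.toList 0).map Prod.snd = (pvPieces t.toList 0).map Prod.snd := by
      rw [pvPieces_map_snd, pvPieces_map_snd]; exact hfil
    have hlen : PySem.Str.len s = (s.toList.length : Int) := by
      simp [PySem.Str.len_eq]
    have hlent : PySem.Str.len s = (t.toList.length : Int) := by
      rw [hlen]; exact_mod_cast hlen0
    have eSL : (PySem.List.pyRange 0 (PySem.Str.len s) 1).filter
          (fun i => PySem.List.pyGet? s.toList i == some 'L')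
        = ((pvPieces s.toList 0).filter (fun p => p.2 == 'L')).map (fun p => (p.1 : Int)) := by
      rw [hlen]; exact pvRangeFilter 'L' (by decide) s.toList
    have eTL : (PySem.List.pyRange 0 (PySem.Str.len s) 1).filter
          (fun i => PySem.List.pyGet? t.toList i == some 'L')
        = ((pvPieces t.toList 0).filter (fun p => p.2 == 'L')).map (fun p => (p.1 : Int)) := by
      rw [hlent]; exact pvRangeFilter 'L' (by decide) t.toList
    have eSR : (PySem.List.pyRange 0 (PySem.Str.len s) 1).filter
          (fun i => PySem.List.pyGet? s.toList i == some 'R')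
        = ((pvPieces s.toList 0).filter (fun p => p.2 == 'R')).map (fun p => (p.1 : Int)) := by
      rw [hlen]; exact pvRangeFilter 'R' (by decide) s.toList
    have eTR : (PySem.List.pyRange 0 (PySem.Str.len s) 1).filter
          (fun i => PySem.List.pyGet? t.toList i == some 'R')
        = ((pvPieces t.toList 0).filter (fun p => p.2 == 'R')).map (fun p => (p.1 : Int)) := by
      rw [hlent]; exact pvRangeFilter 'R' (by decide) t.toList
    have hcomp : ∀ (l : List ((Nat × Char) × (Nat × Char))),
        (l.any ((fun p : Int × Int => decide (p.1 < p.2))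
            ∘ Prod.map (fun p : Nat × Char => (p.1 : Int)) (fun p : Nat × Char => (p.1 : Int))))
          = l.any (fun p => decide (p.1.1 < p.2.1)) := by
      intro l; congr 1; funext a; simp [Function.comp]
    have hcomp2 : ∀ (l : List ((Nat × Char) × (Nat × Char))),
        (l.any ((fun p : Int × Int => decide (p.1 > p.2))
            ∘ Prod.map (fun p : Nat × Char => (p.1 : Int)) (fun p : Nat × Char => (p.1 : Int))))
          = l.any (fun p => decide (p.2.1 < p.1.1)) := by
      intro l; congr 1; funext a; simp [Function.comp]
    simp only [PySem.Str.pyGet?_eq, PySem.Chars.pyGet?_eq_listPyGet?, eSL, eTL, eSR, eTR,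
      List.zip_map, List.any_map, hcomp, hcomp2]
    rw [pvCheck_of_snd_eq _ _ hsnd]
    cases hA : ((pvPieces s.toList 0).filter (fun p => p.2 == 'L')).zip
        ((pvPieces t.toList 0).filter (fun p => p.2 == 'L')) |>.any
        (fun p => decide (p.1.1 < p.2.1)) <;>
      cases hB : ((pvPieces s.toList 0).filter (fun p => p.2 == 'R')).zip
          ((pvPieces t.toList 0).filter (fun p => p.2 == 'R')) |>.any
          (fun p => decide (p.2.1 < p.1.1)) <;>
      simp
  · rw [if_pos (by simp [hrep])]
    cases hB : pvCheck (pvPieces s.toList 0) (pvPieces t.toList 0) with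
    | false => rfl
    | true =>
      exfalso
      apply hrep
      apply (pvStrReplace_iff s t).mpr
      rw [← pvPieces_map_snd s.toList 0, ← pvPieces_map_snd t.toList 0]
      exact pvCheck_sound _ _ hB
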